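-- pv_equiv track=rewrite | github.com/CheshireCat12/hackerrank | algorithms/emasupercomputer.py | compute_max_product
-- ===== SOURCE A (Python) =====
-- from itertools import combinations
--
-- def compute_max_product(pluses):
--     """
--     Find the 2 biggest pluses that don't overlap. Then multiply them together.
--
--     In:
--     unique_pluses (list(tuple(int, set)))
--
--     Out:
--     (int): product of the 2 biggest pluses.
--     """
--     product_pluses = [(idx1, idx2, val1*val2)
--                       for (idx1, (val1, _)), (idx2, (val2, _))
--                       in combinations(enumerate(pluses), 2)]
--     product_pluses.sort(key=lambda x: x[2], reverse=True)
--
--     for idx1, idx2, product in product_pluses: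
--         if not (pluses[idx1][1] & pluses[idx2][1]):
--             return product
--
--     return max([size_plus for size_plus, _ in pluses]) if pluses else 1
-- ===== SOURCE B (Python) =====
-- def compute_max_product(pluses):
--     """
--     Find the 2 biggest pluses that don't overlap. Then multiply them together.
--
--     Single pass over all pairs keeping the running maximum product among
--     disjoint pairs; no intermediate list, no sort.
--     """
--     best = None
--     rest = pluses
--     while rest:
--         (val1, cells1), rest = rest[0], rest[1:]
--         for val2, cells2 in rest:
--             if not (cells1 & cells2):
--                 p = val1 * val2
--                 if best is None or p > best:
--                     best = p
--     if best is not None: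
--         return best
--     return max([size_plus for size_plus, _ in pluses]) if pluses else 1
-- ===== Notes on version B (the rewrite author's own statement) =====
-- stated objective: alternative
-- what changed: B replaces A's materialize-all-pair-products + reverse-sort + first-disjoint scan with a single pass over all pairs that keeps a running maximum product among disjoint pairs (no intermediate list, no sort), with the same fallback.
import Mathlib
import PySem

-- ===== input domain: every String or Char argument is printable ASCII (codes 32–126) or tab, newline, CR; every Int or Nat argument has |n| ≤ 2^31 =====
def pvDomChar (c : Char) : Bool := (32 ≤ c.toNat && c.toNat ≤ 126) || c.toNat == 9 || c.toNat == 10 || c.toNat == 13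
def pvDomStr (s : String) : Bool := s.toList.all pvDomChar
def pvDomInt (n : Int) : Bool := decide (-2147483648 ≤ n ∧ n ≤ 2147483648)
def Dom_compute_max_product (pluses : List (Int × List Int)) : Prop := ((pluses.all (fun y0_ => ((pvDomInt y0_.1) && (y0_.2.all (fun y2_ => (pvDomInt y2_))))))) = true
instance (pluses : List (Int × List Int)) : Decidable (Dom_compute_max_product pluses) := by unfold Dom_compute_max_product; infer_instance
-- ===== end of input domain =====

-- B drops A's pair-product list and reverse sort for a single running-maximum pass over the pairs (same value everywhere).

-- ===== PORT A =====
-- the list comprehension over combinations(enumerate(pluses), 2)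
def pvProductsA (pluses : List (Int × List Int)) : List (Int × Int × Int) :=
  (PySem.List.combinations (PySem.List.enumerate pluses 0) 2).filterMap (fun c =>
    match c with
    | [(idx1, (val1, _)), (idx2, (val2, _))] => some (idx1, idx2, val1 * val2)
    | _ => none)

-- the 'for idx1, idx2, product in product_pluses: if not (… & …): return product' loop
-- (pyGetD default is unreachable: the indices come from enumerate, hence are in range)
def pvLoopA (pluses : List (Int × List Int)) : List (Int × Int × Int) → Option Int
  | [] => none
  | (idx1, idx2, product) :: rest =>
      if PySem.Set.inter (PySem.List.pyGetD pluses idx1 (0, [])).2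
                         (PySem.List.pyGetD pluses idx2 (0, [])).2 = [] then
        some product
      else pvLoopA pluses rest

def compute_max_product (pluses : List (Int × List Int)) : Int :=
  let product_pluses := PySem.List.sorted (pvProductsA pluses) (fun x => x.2.2) true
  match pvLoopA pluses product_pluses with
  | some product => product
  | none =>
      if pluses = [] then 1
      else (PySem.List.max? (pluses.map (fun p => p.1)) (fun x => x)).getD 1

-- ===== PORT B =====
-- inner 'for val2, cells2 in rest' updating the running best
def pvInnerB (val1 : Int) (cells1 : List Int) (rest : List (Int × List Int))
    (best : Option Int) : Option Int :=
  rest.foldl (fun b q =>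
    if PySem.Set.inter cells1 q.2 = [] then
      match b with
      | none => some (val1 * q.1)
      | some x => if val1 * q.1 > x then some (val1 * q.1) else some x
    else b) best

-- the 'while rest' loop peeling off the head
def pvLoopB : List (Int × List Int) → Option Int → Option Int
  | [], best => best
  | (val1, cells1) :: rest, best => pvLoopB rest (pvInnerB val1 cells1 rest best)

def compute_max_product_alt (pluses : List (Int × List Int)) : Int :=
  match pvLoopB pluses none with
  | some best => best
  | none =>
      if pluses = [] then 1
      else (PySem.List.max? (pluses.map (fun p => p.1)) (fun x => x)).getD 1

-- ===== PRECONDITION & SPEC =====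
def Spec_compute_max_product (pluses : List (Int × List Int)) (out : Int) : Prop := out = compute_max_product_alt pluses
instance (pluses : List (Int × List Int)) (out : Int) : Decidable (Spec_compute_max_product pluses out) := by unfold Spec_compute_max_product; infer_instance

-- ===== CLAIM (what is proved, stated in full; the proofs are below) =====
def Claim_equal_compute_max_product : Prop := ∀ (pluses : List (Int × List Int)), Dom_compute_max_product pluses → Spec_compute_max_product pluses (compute_max_product pluses)

-- ===== LEMMAS AND PROOFS =====


-- proof-only helpers: the running-max step, the loop predicate of A, and the list of
-- products of disjoint pairs both programs are computing the maximum of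
def pvOMax (b : Option Int) (p : Int) : Option Int :=
  match b with
  | none => some p
  | some x => if p > x then some p else some x

def pvQ (pluses : List (Int × List Int)) (t : Int × Int × Int) : Bool :=
  decide (PySem.Set.inter (PySem.List.pyGetD pluses t.1 (0, [])).2
                          (PySem.List.pyGetD pluses t.2.1 (0, [])).2 = [])

def pvGoodF (c : List (Int × List Int)) : Option Int :=
  match c with
  | [a, b] => if PySem.Set.inter a.2 b.2 = [] then some (a.1 * b.1) else none
  | _ => none

def pvGood (pluses : List (Int × List Int)) : List Int :=
  (PySem.List.combinations pluses 2).filterMap pvGoodF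

lemma pvLoopA_eq_find? (pluses : List (Int × List Int)) (L : List (Int × Int × Int)) :
    pvLoopA pluses L = (L.find? (pvQ pluses)).map (fun t => t.2.2) := by
  induction L with
  | nil => rfl
  | cons t rest ih =>
    obtain ⟨i1, i2, p⟩ := t
    by_cases h : PySem.Set.inter (PySem.List.pyGetD pluses i1 (0, [])).2
        (PySem.List.pyGetD pluses i2 (0, [])).2 = [] <;>
      simp [pvLoopA, pvQ, h, ih]

lemma pvInnerB_eq_foldl (v : Int) (s : List Int) (rest : List (Int × List Int))
    (best : Option Int) :
    pvInnerB v s rest best =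
      (rest.filterMap (fun q => if PySem.Set.inter s q.2 = [] then some (v * q.1) else none)).foldl
        pvOMax best := by
  rw [List.foldl_filterMap]
  unfold pvInnerB
  congr 1
  funext b q
  by_cases h : PySem.Set.inter s q.2 = [] <;> simp [h, pvOMax]

lemma pvGood_cons (a : Int × List Int) (rest : List (Int × List Int)) :
    pvGood (a :: rest) =
      (rest.filterMap (fun q => if PySem.Set.inter a.2 q.2 = [] then some (a.1 * q.1) else none))
        ++ pvGood rest := by
  unfold pvGood
  rw [show (2 : Nat) = 1 + 1 from rfl, PySem.List.combinations_cons_succ,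
    PySem.List.combinations_one, List.filterMap_append, List.map_map, List.filterMap_map]
  rfl

lemma pvLoopB_eq_foldl (l : List (Int × List Int)) (best : Option Int) :
    pvLoopB l best = (pvGood l).foldl pvOMax best := by
  induction l generalizing best with
  | nil => simp [pvLoopB, pvGood, PySem.List.combinations_nil_succ]
  | cons a rest ih =>
    rw [pvLoopB, ih, pvGood_cons, List.foldl_append, pvInnerB_eq_foldl]

lemma pvFoldl_pvOMax_some (l : List Int) (x : Int) :
    l.foldl pvOMax (some x) = some (l.foldl max x) := by
  induction l generalizing x with
  | nil => rfl
  | cons y ys ih =>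
    have h : pvOMax (some x) y = some (max x y) := by
      simp only [pvOMax]
      split
      · exact congrArg some (max_eq_right (by omega)).symm
      · exact congrArg some (max_eq_left (by omega)).symm
    simp [List.foldl_cons, h, ih]

lemma pvFoldl_pvOMax_none (l : List Int) : l.foldl pvOMax none = l.max? := by
  cases l with
  | nil => rfl
  | cons x xs => rw [List.foldl_cons, show pvOMax none x = some x from rfl,
      pvFoldl_pvOMax_some]; rfl

lemma pvMem_combinations_two {α : Type} {l : List α} {c : List α}
    (h : c ∈ PySem.List.combinations l 2) : ∃ a b, c = [a, b] ∧ a ∈ l ∧ b ∈ l := by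
  rw [PySem.List.mem_combinations_iff] at h
  obtain ⟨hsub, hlen⟩ := h
  match c, hlen with
  | [a, b], _ =>
    exact ⟨a, b, rfl, hsub.subset (by simp), hsub.subset (by simp)⟩

lemma pvLookup_enumerate {pluses : List (Int × List Int)} {a : Int × (Int × List Int)}
    (h : a ∈ PySem.List.enumerate pluses 0) :
    PySem.List.pyGetD pluses a.1 (0, ([] : List Int)) = a.2 := by
  rw [PySem.List.mem_enumerate_iff] at h
  obtain ⟨k, hk, rfl⟩ := h
  simp [PySem.List.pyGetD_natCast, List.getD_eq_getElem?_getD, hk]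

-- the pair-products A filters out of its sorted list are exactly pvGood (as a list)
lemma pvFiltered_products_eq (pluses : List (Int × List Int)) :
    ((pvProductsA pluses).filter (pvQ pluses)).map (fun t => t.2.2) = pvGood pluses := by
  unfold pvProductsA
  rw [List.filter_filterMap, List.map_filterMap]
  have hgood : pvGood pluses =
      (PySem.List.combinations (PySem.List.enumerate pluses 0) 2).filterMap
        (fun c => pvGoodF (c.map Prod.snd)) := by
    unfold pvGood
    conv_lhs => rw [show pluses = (PySem.List.enumerate pluses 0).map Prod.snd by
      rw [PySem.List.map_snd_enumerate]]
    rw [PySem.List.combinations_map, List.filterMap_map]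
    rfl
  rw [hgood]
  apply List.filterMap_congr
  intro c hc
  obtain ⟨a, b, rfl, ha, hb⟩ := pvMem_combinations_two hc
  have la := pvLookup_enumerate ha
  have lb := pvLookup_enumerate hb
  by_cases h : PySem.Set.inter a.2.2 b.2.2 = [] <;>
    simp [pvQ, pvGoodF, la, lb, h]

lemma pvA_eq_max? (pluses : List (Int × List Int)) :
    (((PySem.List.sorted (pvProductsA pluses) (fun x => x.2.2) true).find?
        (pvQ pluses)).map (fun t => t.2.2)) = (pvGood pluses).max? := by
  set L := PySem.List.sorted (pvProductsA pluses) (fun x => x.2.2) true with hL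
  have hperm : ((L.filter (pvQ pluses)).map (fun t => t.2.2)).Perm (pvGood pluses) := by
    rw [← pvFiltered_products_eq pluses]
    exact ((PySem.List.sorted_perm ..).filter _).map _
  cases hf : L.find? (pvQ pluses) with
  | none =>
    rw [List.find?_eq_none] at hf
    have : L.filter (pvQ pluses) = [] := List.filter_eq_nil_iff.mpr hf
    rw [this] at hperm
    simp [hperm.nil_eq.symm]
  | some t =>
    have hQt : pvQ pluses t := (List.find?_eq_some_iff_append.mp hf).1
    obtain ⟨as, bs, hsplit, has⟩ := (List.find?_eq_some_iff_append.mp hf).2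
    have hpw : L.Pairwise (fun a b => (fun x : Int × Int × Int => x.2.2) b ≤
        (fun x : Int × Int × Int => x.2.2) a) := PySem.List.sorted_pairwise_rev ..
    rw [hsplit, List.pairwise_append] at hpw
    have hbs : ∀ u ∈ bs, u.2.2 ≤ t.2.2 := fun u hu =>
      (List.pairwise_cons.mp hpw.2.1).1 u hu
    have hub : ∀ y ∈ (pvGood pluses), y ≤ t.2.2 := by
      intro y hy
      have hy' := hperm.mem_iff.mpr hy
      simp only [List.mem_map, List.mem_filter] at hy'
      obtain ⟨u, ⟨huL, hQu⟩, rfl⟩ := hy'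
      rw [hsplit] at huL
      rcases List.mem_append.mp huL with h1 | h2
      · exact absurd hQu (by simpa using has u h1)
      · rcases List.mem_cons.mp h2 with rfl | h3
        · exact le_refl _
        · exact hbs u h3
    have hmem : t.2.2 ∈ pvGood pluses := by
      apply hperm.mem_iff.mp
      exact List.mem_map_of_mem (List.mem_filter.mpr ⟨by rw [hsplit]; simp, hQt⟩)
    rw [List.max?_eq_some_iff.mpr ⟨hmem, hub⟩]
    rfl

-- ===== VERDICT (by name: the statement is the Claim_ definition above) =====
theorem compute_max_product_spec : Claim_equal_compute_max_product := by
  intro pluses _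
  show compute_max_product pluses = compute_max_product_alt pluses
  unfold compute_max_product compute_max_product_alt
  simp only [pvLoopA_eq_find?, pvLoopB_eq_foldl, pvFoldl_pvOMax_none, pvA_eq_max?]
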